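-- pv_equiv track=rewrite | github.com/user1121114685/dkluff-code | code/work/lazyed_bluecoat/liblaz/dklib.py | drawList
-- ===== SOURCE A (Python) =====
-- def drawList(s):
--     k="<ul>{0}</ul>"
--     items=list(s)
--     temp=""
--     i=0
--     while i < 5:
--         try:
--             temp += "<li>"+str(items.pop())+"</li>\n"
--             i +=1
--         except IndexError:
--             break
--     _k=""
--     if len(items)>0:
--         _temp="<option>--More--</option>"
--         _k="<li><select>{0}</select></li>"
--         while True:
--             try:
--                 _temp += "<option>"+str(items.pop())+"</option>"
--             except IndexError:
--                 break
--         _k=_k.format(_temp)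
--     temp+=_k
--     return k.format(temp)
-- ===== SOURCE B (Python) =====
-- def drawList(s):
--     rev = list(reversed(s))
--     head, tail = rev[:5], rev[5:]
--     temp = "".join("<li>" + str(x) + "</li>\n" for x in head)
--     if tail:
--         opts = "<option>--More--</option>" + "".join("<option>" + str(x) + "</option>" for x in tail)
--         temp += "<li><select>{0}</select></li>".format(opts)
--     return "<ul>{0}</ul>".format(temp)
-- ===== Notes on version B (the rewrite author's own statement) =====
-- stated objective: simpler
-- what changed: Replaced the two mutate-and-catch-IndexError pop loops by reversing once and slicing at 5, building each block with a join over the slices.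
import Mathlib
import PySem

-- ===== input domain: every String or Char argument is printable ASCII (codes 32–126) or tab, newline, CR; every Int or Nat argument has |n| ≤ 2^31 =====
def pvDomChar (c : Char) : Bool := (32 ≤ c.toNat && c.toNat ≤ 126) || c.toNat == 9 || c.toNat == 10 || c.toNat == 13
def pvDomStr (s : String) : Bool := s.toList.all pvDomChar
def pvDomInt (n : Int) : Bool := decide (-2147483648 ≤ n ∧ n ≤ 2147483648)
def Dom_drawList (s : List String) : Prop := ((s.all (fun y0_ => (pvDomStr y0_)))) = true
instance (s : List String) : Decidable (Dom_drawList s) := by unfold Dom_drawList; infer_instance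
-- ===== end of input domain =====

-- B replaces A's two mutate-and-catch-IndexError pop loops by reverse + slicing at 5 and joins (simpler decomposition; return value only, A pops its local copy).

-- ===== PORT A =====
-- first while loop: i < 5, pop last element, append "<li>…</li>\n"; break on IndexError
def drawListLoopA1 (items : List String) (temp : String) (i : Nat) : List String × String :=
  if i < 5 then
    match PySem.List.pop? items (-1) with
    | some (x, rest) => drawListLoopA1 rest (temp ++ "<li>" ++ x ++ "</li>\n") (i + 1)
    | none => (items, temp)
  else (items, temp)
termination_by 5 - i

-- second while True loop: pop last element, append "<option>…</option>"; break on IndexError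
def drawListLoopA2 (items : List String) (temp : String) : String :=
  match h : PySem.List.pop? items (-1) with
  | some r => drawListLoopA2 r.2 (temp ++ "<option>" ++ r.1 ++ "</option>")
  | none => temp
termination_by items.length
decreasing_by
  have := PySem.List.length_of_pop?_eq_some items h
  omega

def drawList (s : List String) : String :=
  let items := s
  let p := drawListLoopA1 items "" 0
  let k2 := if p.1.length > 0 then
      "<li><select>" ++ drawListLoopA2 p.1 "<option>--More--</option>" ++ "</select></li>"
    else ""
  "<ul>" ++ (p.2 ++ k2) ++ "</ul>"

-- ===== PORT B =====
def drawList_alt (s : List String) : String :=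
  let rev := s.reverse
  let head := PySem.List.slice rev none (some 5)
  let tail := PySem.List.slice rev (some 5) none
  let temp := PySem.Str.join "" (head.map (fun x => "<li>" ++ x ++ "</li>\n"))
  let temp := if tail ≠ [] then
      temp ++ ("<li><select>" ++
        ("<option>--More--</option>" ++
          PySem.Str.join "" (tail.map (fun x => "<option>" ++ x ++ "</option>"))) ++
        "</select></li>")
    else temp
  "<ul>" ++ temp ++ "</ul>"

-- ===== PRECONDITION & SPEC =====
def Spec_drawList (s : List String) (out : String) : Prop := out = drawList_alt s
instance (s : List String) (out : String) : Decidable (Spec_drawList s out) := by unfold Spec_drawList; infer_instance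

-- ===== CLAIM =====
def Claim_equal_drawList : Prop := ∀ (s : List String), Dom_drawList s → Spec_drawList s (drawList s)

-- ===== LEMMAS AND PROOFS =====
theorem join_empty_cons (a : String) (l : List String) :
    PySem.Str.join "" (a :: l) = a ++ PySem.Str.join "" l := by
  cases l with
  | nil => simp [PySem.Str.join, PySem.Chars.join_singleton, PySem.Chars.join_nil]
  | cons b bs => simp [PySem.Str.join, PySem.Chars.join_cons_cons]

theorem loopA2_eq (items : List String) (temp : String) :
    drawListLoopA2 items temp =
      temp ++ PySem.Str.join "" (items.reverse.map (fun x => "<option>" ++ x ++ "</option>")) := by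
  induction items using List.reverseRecOn generalizing temp with
  | nil =>
    rw [drawListLoopA2.eq_def]
    simp [PySem.List.pop?, PySem.List.pyIdx?, PySem.Str.join, PySem.Chars.join_nil]
  | append_singleton ys x ih =>
    rw [drawListLoopA2.eq_def]
    split
    case h_1 r hr =>
      rw [PySem.List.pop?_last] at hr
      injection hr with hr; subst hr
      rw [ih]
      simp [join_empty_cons, String.append_assoc]
    case h_2 hr =>
      rw [PySem.List.pop?_last] at hr
      exact absurd hr (by simp)

theorem loopA1_eq (n : Nat) (items : List String) (temp : String) (i : Nat) (h : i + n = 5) :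
    drawListLoopA1 items temp i =
      ((items.reverse.drop n).reverse,
        temp ++ PySem.Str.join "" ((items.reverse.take n).map (fun x => "<li>" ++ x ++ "</li>\n"))) := by
  induction n generalizing items temp i with
  | zero =>
    rw [drawListLoopA1.eq_def]
    simp [show ¬ i < 5 by omega, PySem.Str.join, PySem.Chars.join_nil]
  | succ m ih =>
    cases items using List.reverseRecOn with
    | nil =>
      rw [drawListLoopA1.eq_def]
      simp [show i < 5 by omega, PySem.List.pop?, PySem.List.pyIdx?, PySem.Str.join,
        PySem.Chars.join_nil]
    | append_singleton ys x =>
      rw [drawListLoopA1.eq_def]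
      simp only [show i < 5 by omega, if_pos]
      split
      case h_1 r hr =>
        rw [PySem.List.pop?_last] at hr
        injection hr with hr
        injection hr with h1 h2
        subst h1; subst h2
        rw [ih ys _ (i + 1) (by omega)]
        simp [join_empty_cons, String.append_assoc]
      case h_2 hr =>
        rw [PySem.List.pop?_last] at hr
        exact absurd hr (by simp)

-- ===== VERDICT =====
theorem drawList_spec : Claim_equal_drawList := by
  intro s _
  show drawList s = drawList_alt s
  simp only [drawList, drawList_alt]
  rw [loopA1_eq 5 s "" 0 rfl, PySem.List.slice_to s.reverse (b := 5) (by norm_num),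
    PySem.List.slice_from s.reverse (a := 5) (by norm_num), loopA2_eq]
  norm_num
  by_cases hl : 5 < s.length
  · simp [hl, String.append_assoc]
  · simp [hl]
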